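-- pv_equiv track=rewrite | github.com/VsevolodKozlov-git/algos-practice | Leetcode/916-word-subsets/main.py | create_master_dict
-- ===== SOURCE A (Python) =====
-- from collections import Counter
--
-- def create_master_dict(words):
--     master_dict = {}
--     for subset in words:
--         counter_dict = Counter(subset)
--         for letter, cnt in counter_dict.items():
--             if master_dict.setdefault(letter, cnt) < cnt:
--                 master_dict[letter] = cnt
--     return master_dict
-- ===== SOURCE B (Python) =====
-- from collections import Counter
--
-- def create_master_dict(words):
--     joined = "".join(words)
--     counts = [Counter(w) for w in words]
--     return {c: max(cnt[c] for cnt in counts) for c in dict.fromkeys(joined)}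
-- ===== Notes on version B (the rewrite author's own statement) =====
-- stated objective: idiomatic
-- what changed: Replaces A's imperative accumulator dict with setdefault/compare updates by a dict comprehension: dedup the concatenation for the key order and take, per letter, the max over precomputed per-word Counters.
import Mathlib
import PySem

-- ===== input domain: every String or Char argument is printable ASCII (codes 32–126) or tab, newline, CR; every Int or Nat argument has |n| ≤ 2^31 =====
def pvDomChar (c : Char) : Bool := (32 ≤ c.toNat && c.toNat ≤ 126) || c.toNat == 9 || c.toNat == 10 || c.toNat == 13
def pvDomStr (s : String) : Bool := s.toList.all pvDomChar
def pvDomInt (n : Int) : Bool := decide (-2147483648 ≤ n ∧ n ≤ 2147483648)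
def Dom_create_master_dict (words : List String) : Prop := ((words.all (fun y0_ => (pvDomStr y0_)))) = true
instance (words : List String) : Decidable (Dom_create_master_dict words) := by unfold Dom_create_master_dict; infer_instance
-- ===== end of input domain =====

-- B replaces A's imperative accumulator dict (setdefault/compare per letter) by a dict
-- comprehension: key order = dedup of the concatenation, value = max over per-word Counters.

-- ===== PORT A =====
-- one inner-loop body of A: 'if master_dict.setdefault(letter, cnt) < cnt: master_dict[letter] = cnt'
def pvStepA (m : PySem.Dict String Int) (p : String × Int) : PySem.Dict String Int :=
  let v := (m.get? p.1).getD p.2      -- the value setdefault RETURNS (existing, else cnt)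
  let m1 := m.setdefault p.1 p.2
  if v < p.2 then m1.insert p.1 p.2 else m1

def create_master_dict (words : List String) : List (String × Int) :=
  (words.foldl
    (fun master subset =>
      (PySem.Dict.counter (subset.toList.map (fun c => String.singleton c))).items.foldl
        pvStepA master)
    PySem.Dict.empty).items

-- ===== PORT B =====
-- Source B: joined = "".join(words); counts = [Counter(w) for w in words];
--       {c: max(cnt[c] for cnt in counts) for c in dict.fromkeys(joined)}
-- max(...)'s generator is nonempty for every produced key c (c occurs in some word),
-- so the .getD 0 default of the Option-returning max? is never used.
def create_master_dict_alt (words : List String) : List (String × Int) :=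
  let joined := PySem.Str.join "" words
  let counts := words.map (fun w => PySem.Dict.counter (w.toList.map (fun c => String.singleton c)))
  (PySem.List.dedup (joined.toList.map (fun c => String.singleton c))).map
    (fun c => (c, (PySem.List.max? (counts.map (fun cnt => cnt.getD c 0)) (fun x => x)).getD 0))

-- ===== PRECONDITION & SPEC =====
def Spec_create_master_dict (words : List String) (out : List (String × Int)) : Prop := out = create_master_dict_alt words
instance (words : List String) (out : List (String × Int)) : Decidable (Spec_create_master_dict words out) := by unfold Spec_create_master_dict; infer_instance

-- ===== CLAIM (what is proved, stated in full; the proofs are below) =====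
def Claim_equal_create_master_dict : Prop := ∀ (words : List String), Dom_create_master_dict words → Spec_create_master_dict words (create_master_dict words)

-- ===== LEMMAS AND PROOFS =====

def pvLtrs (ws : List String) : List String :=
  (ws.map (fun w => w.toList.map (fun c => String.singleton c))).flatten

def pvVm (ws : List String) (c : String) : Int :=
  (ws.map (fun w => ((w.toList.map (fun c => String.singleton c)).count c : Int))).foldl max 0

def pvNewVal (D : List String) (m : String → Int) (l : List (String × Int)) (c : String) : Int :=
  match List.lookup c l with
  | some v => if c ∈ D then max (m c) v else v
  | none => m c

lemma pv_lookup_eq_none {l : List (String × Int)} {c : String}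
    (h : c ∉ l.map Prod.fst) : List.lookup c l = none := by
  induction l with
  | nil => rfl
  | cons p t ih =>
    simp only [List.map_cons, List.mem_cons, not_or] at h
    rw [List.lookup, show (c == p.1) = false from beq_eq_false_iff_ne.mpr h.1, ih h.2]

lemma pv_lookup_map {L : List String} {f : String → Int} {c : String} :
    List.lookup c (L.map (fun k => (k, f k))) = if c ∈ L then some (f c) else none := by
  induction L with
  | nil => simp
  | cons a t ih =>
    by_cases hca : c = a
    · subst hca; simp
    · rw [List.map_cons, List.lookup, show (c == a) = false from beq_eq_false_iff_ne.mpr hca, ih]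
      simp [hca]

lemma pv_contains_mk_map (D : List String) (m : String → Int) (k : String) :
    (PySem.Dict.mk (D.map (fun c => (c, m c)))).contains k = decide (k ∈ D) := by
  rw [PySem.Dict.contains_mk, List.any_map]
  induction D with
  | nil => simp
  | cons a t ih =>
    simp only [List.any_cons, ih, List.mem_cons, Function.comp]
    by_cases h : a = k
    · subst h; simp
    · have h3 : ¬k = a := fun hh => h hh.symm
      by_cases h2 : k ∈ t <;> simp [h2, beq_eq_false_iff_ne.mpr h, h3]

lemma pv_keys_mk_map (D : List String) (m : String → Int) :
    (PySem.Dict.mk (D.map (fun c => (c, m c)))).keys = D := by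
  rw [PySem.Dict.keys_mk, List.map_map]
  exact List.map_id D

lemma pv_foldl_max_zero {t : List Int} (h : ∀ x ∈ t, x = 0) : t.foldl max 0 = 0 := by
  induction t with
  | nil => rfl
  | cons a u ih =>
    have ha : a = 0 := h a (by simp)
    simp only [List.foldl_cons, ha, max_self]
    exact ih (fun x hx => h x (by simp [hx]))

lemma pv_vm_nonneg (ws : List String) (c : String) : 0 ≤ pvVm ws c :=
  (PySem.List.le_foldl_max _ 0).1

lemma pv_vm_zero {ws : List String} {c : String} (h : c ∉ pvLtrs ws) : pvVm ws c = 0 := by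
  apply pv_foldl_max_zero
  intro x hx
  simp only [List.mem_map] at hx
  obtain ⟨w, hw, rfl⟩ := hx
  have : c ∉ w.toList.map (fun c => String.singleton c) := by
    intro hc
    exact h (by simp only [pvLtrs, List.mem_flatten]; exact ⟨_, List.mem_map_of_mem hw, hc⟩)
  simp [List.count_eq_zero.mpr this]

lemma pv_join_nil (l : List (List Char)) : List.intercalate ([] : List Char) l = l.flatten := by
  induction l with
  | nil => rfl
  | cons a t ih =>
    cases t with
    | nil => simp [List.intercalate]
    | cons b u =>
      simp only [List.intercalate, List.intersperse] at *
      simp_all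

lemma pv_ofList_append (L K : List String) :
    PySem.Set.ofList (L ++ K)
      = PySem.Set.ofList L
        ++ (PySem.Set.ofList K).filter (fun c => decide (c ∉ PySem.Set.ofList L)) := by
  induction K using List.reverseRecOn with
  | nil => simp [PySem.Set.ofList_nil]
  | append_singleton K y ih =>
    rw [← List.append_assoc, PySem.Set.ofList_append_singleton, PySem.Set.ofList_append_singleton, ih]
    by_cases hyK : y ∈ K
    · by_cases hyL : y ∈ L
      · rw [PySem.Set.add_of_mem (by simp [PySem.Set.mem_ofList, hyL]),
            PySem.Set.add_of_mem ((PySem.Set.mem_ofList K y).mpr hyK)]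
      · rw [PySem.Set.add_of_mem (by simp [PySem.Set.mem_ofList, hyK, hyL]),
            PySem.Set.add_of_mem ((PySem.Set.mem_ofList K y).mpr hyK)]
    · rw [PySem.Set.add_of_not_mem (fun h => hyK ((PySem.Set.mem_ofList K y).mp h))]
      by_cases hyL : y ∈ L
      · rw [PySem.Set.add_of_mem (by simp [PySem.Set.mem_ofList, hyL])]
        simp [List.filter_append, PySem.Set.mem_ofList, hyL]
      · rw [PySem.Set.add_of_not_mem (by simp [PySem.Set.mem_ofList, hyK, hyL])]
        simp [List.filter_append, PySem.Set.mem_ofList, hyL, List.append_assoc]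

lemma pv_inner (l : List (String × Int)) (D : List String) (m : String → Int)
    (hl : (l.map Prod.fst).Nodup) (hD : D.Nodup) :
    l.foldl pvStepA (PySem.Dict.mk (D.map (fun c => (c, m c))))
      = PySem.Dict.mk ((D ++ (l.map Prod.fst).filter (fun c => decide (c ∉ D))).map
          (fun c => (c, pvNewVal D m l c))) := by
  induction l generalizing D m with
  | nil => simp [pvNewVal]
  | cons p rest ih =>
    obtain ⟨k, v0⟩ := p
    simp only [List.map_cons, List.nodup_cons] at hl
    obtain ⟨hknotin, hrestnd⟩ := hl
    rw [List.foldl_cons]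
    by_cases hk : k ∈ D
    · have hcont : (PySem.Dict.mk (D.map (fun c => (c, m c)))).contains k = true := by
        rw [pv_contains_mk_map]; exact decide_eq_true hk
      have hget : (PySem.Dict.mk (D.map (fun c => (c, m c)))).get? k = some (m k) := by
        apply PySem.Dict.get?_of_mem_items
        · exact List.mem_map_of_mem hk
        · rw [pv_keys_mk_map]; exact hD
      have hstep : pvStepA (PySem.Dict.mk (D.map (fun c => (c, m c)))) (k, v0)
          = PySem.Dict.mk (D.map (fun c => (c, (fun c => if c = k then max (m c) v0 else m c) c))) := by
        unfold pvStepA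
        simp only [hget, Option.getD_some, PySem.Dict.setdefault_of_contains _ v0 hcont]
        by_cases hlt : m k < v0
        · rw [if_pos hlt]
          apply PySem.Dict.ext
          rw [PySem.Dict.items_insert_of_contains _ v0 hcont]
          show (D.map _).map _ = _
          rw [List.map_map]
          apply List.map_congr_left
          intro c hc
          by_cases hck : c = k
          · subst hck
            simp [max_eq_right (le_of_lt hlt)]
          · simp [Function.comp, beq_eq_false_iff_ne.mpr hck, hck]
        · rw [if_neg hlt]
          apply PySem.Dict.ext
          show D.map _ = D.map _
          apply List.map_congr_left
          intro c hc
          by_cases hck : c = k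
          · subst hck
            simp [max_eq_left (not_lt.mp hlt)]
          · simp [hck]
      rw [hstep, ih _ _ hrestnd hD]
      have hfil : List.filter (fun c => decide (c ∉ D)) (k :: rest.map Prod.fst)
          = List.filter (fun c => decide (c ∉ D)) (rest.map Prod.fst) := by
        simp [hk]
      congr 1
      simp only [List.map_cons, hfil]
      apply List.map_congr_left
      intro c hc
      by_cases hck : c = k
      · subst hck
        have h1 : List.lookup c ((c, v0) :: rest) = some v0 := by simp
        have h2 : List.lookup c rest = none := pv_lookup_eq_none hknotin
        simp [pvNewVal, h1, h2, hk]
      · have h1 : List.lookup c ((k, v0) :: rest) = List.lookup c rest := by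
          rw [List.lookup, show (c == k) = false from beq_eq_false_iff_ne.mpr hck]
        simp only [pvNewVal, h1]
        cases hres : List.lookup c rest with
        | none => simp [hck]
        | some v => simp [hck]
    · have hcont : (PySem.Dict.mk (D.map (fun c => (c, m c)))).contains k = false := by
        rw [pv_contains_mk_map]; exact decide_eq_false hk
      have hget : (PySem.Dict.mk (D.map (fun c => (c, m c)))).get? k = none := by
        rw [PySem.Dict.get?_eq_none_iff_not_mem_keys, pv_keys_mk_map]; exact hk
      have hstep : pvStepA (PySem.Dict.mk (D.map (fun c => (c, m c)))) (k, v0)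
          = PySem.Dict.mk ((D ++ [k]).map (fun c => (c, (fun c => if c = k then v0 else m c) c))) := by
        unfold pvStepA
        simp only [hget, Option.getD_none, PySem.Dict.setdefault_of_not_contains _ v0 hcont,
          lt_self_iff_false, if_false]
        apply PySem.Dict.ext
        rw [PySem.Dict.items_insert_of_not_contains _ v0 hcont]
        show D.map _ ++ [(k, v0)] = _
        rw [List.map_append]
        congr 1
        · apply List.map_congr_left
          intro c hc
          have : c ≠ k := fun h => hk (h ▸ hc)
          simp [this]
        · simp
      rw [hstep, ih _ _ hrestnd
        (by rw [List.nodup_append]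
            refine ⟨hD, List.nodup_singleton _, ?_⟩
            intro a ha b hb heq
            exact hk ((heq.trans (List.mem_singleton.mp hb)) ▸ ha))]
      have hfil : List.filter (fun c => !decide (c ∈ D ++ [k])) (rest.map Prod.fst)
          = List.filter (fun c => !decide (c ∈ D)) (rest.map Prod.fst) := by
        apply List.filter_congr
        intro c hc
        have : c ≠ k := fun h => hknotin (h ▸ hc)
        simp [List.mem_append, this]
      congr 1
      simp only [List.map_cons, List.filter_cons, decide_not]
      rw [hfil, show (!decide (k ∈ D)) = true from by simp [hk]]
      simp only [if_true, List.append_assoc, List.singleton_append]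
      apply List.map_congr_left
      intro c hc
      by_cases hck : c = k
      · subst hck
        have h1 : List.lookup c ((c, v0) :: rest) = some v0 := by simp
        have h2 : List.lookup c rest = none := pv_lookup_eq_none hknotin
        simp [pvNewVal, h1, h2, hk]
      · have h1 : List.lookup c ((k, v0) :: rest) = List.lookup c rest := by
          rw [List.lookup, show (c == k) = false from beq_eq_false_iff_ne.mpr hck]
        simp only [pvNewVal, h1]
        cases hres : List.lookup c rest with
        | none => simp [hck]
        | some v => simp [List.mem_append, hck]

lemma pv_A_items (ws : List String) :
    (ws.foldl
      (fun master subset =>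
        (PySem.Dict.counter (subset.toList.map (fun c => String.singleton c))).items.foldl
          pvStepA master)
      PySem.Dict.empty).items
    = (PySem.Set.ofList (pvLtrs ws)).map (fun c => (c, pvVm ws c)) := by
  induction ws using List.reverseRecOn with
  | nil => rfl
  | append_singleton ws w ih =>
    rw [List.foldl_append, List.foldl_cons, List.foldl_nil]
    have hacc : ws.foldl
        (fun master subset =>
          (PySem.Dict.counter (subset.toList.map (fun c => String.singleton c))).items.foldl
            pvStepA master)
        PySem.Dict.empty
        = PySem.Dict.mk ((PySem.Set.ofList (pvLtrs ws)).map (fun c => (c, pvVm ws c))) :=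
      PySem.Dict.ext ih
    rw [hacc, PySem.Dict.items_counter]
    have hltrs : pvLtrs (ws ++ [w]) = pvLtrs ws ++ w.toList.map (fun c => String.singleton c) := by
      rw [pvLtrs, pvLtrs, List.map_append, List.flatten_append]
      simp
    have hfst : ((PySem.Set.ofList (w.toList.map (fun c => String.singleton c))).map
          (fun k => (k, ((w.toList.map (fun c => String.singleton c)).count k : Int)))).map Prod.fst
        = PySem.Set.ofList (w.toList.map (fun c => String.singleton c)) := by
      rw [List.map_map]; exact List.map_id _
    rw [pv_inner _ (PySem.Set.ofList (pvLtrs ws)) (pvVm ws)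
      (by rw [hfst]; exact PySem.Set.nodup_ofList _)
      (PySem.Set.nodup_ofList _)]
    show ((PySem.Set.ofList (pvLtrs ws) ++ _).map _) = _
    rw [hfst, hltrs, pv_ofList_append]
    apply List.map_congr_left
    intro c hc
    have hvm : pvVm (ws ++ [w]) c
        = max (pvVm ws c) (((w.toList.map (fun c => String.singleton c)).count c : Int)) := by
      rw [pvVm, pvVm, List.map_append, List.foldl_append]
      rfl
    rw [hvm]
    simp only [pvNewVal, pv_lookup_map]
    by_cases hclw : c ∈ w.toList.map (fun c => String.singleton c)
    · rw [if_pos ((PySem.Set.mem_ofList _ c).mpr hclw)]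
      by_cases hcD : c ∈ PySem.Set.ofList (pvLtrs ws)
      · simp [hcD]
      · have h0 : pvVm ws c = 0 :=
          pv_vm_zero (fun h => hcD ((PySem.Set.mem_ofList _ c).mpr h))
        simp only [hcD, if_false]
        rw [h0, max_eq_right (Int.natCast_nonneg _)]
    · rw [if_neg (fun h => hclw ((PySem.Set.mem_ofList _ c).mp h))]
      rw [List.count_eq_zero.mpr hclw]
      simp only [Int.natCast_zero]
      rw [max_eq_left (pv_vm_nonneg ws c)]

lemma pv_B_eq (words : List String) :
    create_master_dict_alt words
      = (PySem.Set.ofList (pvLtrs words)).map (fun c => (c, pvVm words c)) := by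
  rw [create_master_dict_alt]
  have hjoin : (PySem.Str.join "" words).toList.map (fun c => String.singleton c)
      = pvLtrs words := by
    show ((String.ofList (PySem.Chars.join "".toList (words.map String.toList))).toList).map _ = _
    rw [String.toList_ofList]
    show (List.intercalate [] (words.map String.toList)).map _ = _
    rw [pv_join_nil, List.map_flatten, List.map_map, pvLtrs]
    rfl
  rw [hjoin, PySem.List.dedup_eq_ofList]
  apply List.map_congr_left
  intro c hc
  have hcnts : (words.map (fun w => PySem.Dict.counter (w.toList.map (fun c => String.singleton c)))).map
      (fun cnt => cnt.getD c 0)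
      = words.map (fun w => ((w.toList.map (fun c => String.singleton c)).count c : Int)) := by
    rw [List.map_map]
    apply List.map_congr_left
    intro w _
    exact PySem.Dict.getD_counter _ c
  rw [hcnts]
  cases words with
  | nil => exact absurd ((PySem.Set.mem_ofList _ c).mp hc) (by simp [pvLtrs])
  | cons w ws =>
    rw [List.map_cons, PySem.List.max?_id_cons, Option.getD_some, pvVm, List.map_cons, List.foldl_cons,
      max_eq_right (Int.natCast_nonneg ((w.toList.map (fun c => String.singleton c)).count c))]

-- ===== VERDICT (by name: the statement is the Claim_ definition above) =====
theorem create_master_dict_spec : Claim_equal_create_master_dict := by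
  intro words _
  show create_master_dict words = create_master_dict_alt words
  rw [create_master_dict, pv_A_items, pv_B_eq]
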